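-- pv_equiv track=rewrite | github.com/bradrezdev/apollo | tests/test_auth_loading.py | _source_has_yield_after_loading_true
-- ===== SOURCE A (Python) =====
-- def _source_has_yield_after_loading_true(src: str) -> bool:
--     """Verifica que `yield` aparece después de `self.auth_loading = True`."""
--     lines = src.splitlines()
--     found_true = False
--     for line in lines:
--         stripped = line.strip()
--         if "self.auth_loading = True" in stripped:
--             found_true = True
--         if found_true and stripped == "yield":
--             return True
--     return False
-- ===== SOURCE B (Python) =====
-- def _source_has_yield_after_loading_true(src: str) -> bool:
--     """Back-to-front: pop lines off the end until the LAST bare 'yield' line,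
--     then ask whether the marker occurs anywhere in the lines before it."""
--     stripped = [line.strip() for line in src.splitlines()]
--     while stripped:
--         last = stripped.pop()
--         if last == "yield":
--             return any("self.auth_loading = True" in s for s in stripped)
--     return False
-- ===== Notes on version B (the rewrite author's own statement) =====
-- stated objective: alternative
-- what changed: Replaced A's forward flag-driven state machine by its mirror: scan the stripped lines back to front popping from the end, stop at the LAST bare 'yield' line, and answer with a marker-membership test over the lines that remain before it.
import Mathlib
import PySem

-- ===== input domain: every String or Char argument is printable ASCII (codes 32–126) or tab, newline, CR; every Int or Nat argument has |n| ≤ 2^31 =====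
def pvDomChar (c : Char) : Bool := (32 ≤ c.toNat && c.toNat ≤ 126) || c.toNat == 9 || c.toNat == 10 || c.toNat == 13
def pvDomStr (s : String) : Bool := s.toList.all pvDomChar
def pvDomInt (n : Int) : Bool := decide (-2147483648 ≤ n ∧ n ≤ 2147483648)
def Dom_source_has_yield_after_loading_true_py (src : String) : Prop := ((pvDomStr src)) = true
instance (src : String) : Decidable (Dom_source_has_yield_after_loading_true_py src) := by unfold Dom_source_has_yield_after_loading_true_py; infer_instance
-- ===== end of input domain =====

-- B mirrors A: instead of a forward flag-driven scan, it pops lines off the end until the last bare "yield" line and then membership-tests the marker in the lines before it (alternative traversal; same return value).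


-- ===== PORT A =====
-- A's loop: flag found_true carried through the lines; returns True as soon as
-- found_true holds and the stripped line equals "yield".
def pvALoop : List String → Bool → Bool
  | [], _ => false
  | line :: rest, found =>
    let stripped := PySem.Str.strip line
    let found' := found || PySem.Str.isIn "self.auth_loading = True" stripped
    if found' && (stripped == "yield") then true else pvALoop rest found'

def source_has_yield_after_loading_true_py (src : String) : Bool :=
  pvALoop (PySem.Str.splitlines src) false

-- ===== PORT B =====
-- B's while-loop pops from the END of `stripped`; ported as recursion over the
-- REVERSED stripped list (head = last line, tail = the remaining `stripped`,
-- reversed; `tail.reverse` is the `stripped` list the Python any() runs over).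
def pvBRev : List String → Bool
  | [] => false
  | lastLine :: before =>
    if lastLine == "yield" then
      (before.reverse).any (fun s => PySem.Str.isIn "self.auth_loading = True" s)
    else pvBRev before

def source_has_yield_after_loading_true_py_alt (src : String) : Bool :=
  pvBRev (((PySem.Str.splitlines src).map PySem.Str.strip).reverse)

-- ===== PRECONDITION & SPEC =====
def Spec_source_has_yield_after_loading_true_py (src : String) (out : Bool) : Prop := out = source_has_yield_after_loading_true_py_alt src
instance (src : String) (out : Bool) : Decidable (Spec_source_has_yield_after_loading_true_py src out) := by unfold Spec_source_has_yield_after_loading_true_py; infer_instance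

-- ===== CLAIM (what is proved, stated in full; the proofs are below) =====
def Claim_equal_source_has_yield_after_loading_true_py : Prop := ∀ (src : String), Dom_source_has_yield_after_loading_true_py src → Spec_source_has_yield_after_loading_true_py src (source_has_yield_after_loading_true_py src)

-- ===== LEMMAS AND PROOFS =====

-- proof-only intermediate: forward locate-first-marker-then-membership scan
def pvMid : List String → Bool
  | [] => false
  | s :: rest =>
    if PySem.Str.isIn "self.auth_loading = True" s then rest.contains "yield"
    else pvMid rest

-- a line containing the marker is never the bare string "yield"
lemma marker_ne_yield (s : String) (h : PySem.Str.isIn "self.auth_loading = True" s = true) :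
    (s == "yield") = false := by
  by_contra hb
  have hs : s = "yield" := by
    cases hEq : (s == "yield") with
    | false => exact absurd hEq hb
    | true => exact eq_of_beq hEq
  subst hs
  exact absurd h (by decide)

-- once the flag is set, A's remaining scan is exactly a membership test on the stripped lines
lemma pvALoop_true (ls : List String) :
    pvALoop ls true = (ls.map PySem.Str.strip).contains "yield" := by
  induction ls with
  | nil => rfl
  | cons l rest ih =>
    rw [pvALoop]
    simp only [Bool.true_or, Bool.true_and, List.map_cons, List.contains_cons, ih]
    cases h : (PySem.Str.strip l == "yield") with
    | true => simp [eq_of_beq h]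
    | false =>
      have h2 : ¬ ("yield" = PySem.Str.strip l) := by
        intro e; rw [← e] at h; simp at h
      simp [h2]

lemma pvALoop_eq_pvMid (ls : List String) :
    pvALoop ls false = pvMid (ls.map PySem.Str.strip) := by
  induction ls with
  | nil => rfl
  | cons l rest ih =>
    simp only [List.map_cons]
    rw [pvALoop, pvMid]
    simp only [Bool.false_or]
    cases h : PySem.Str.isIn "self.auth_loading = True" (PySem.Str.strip l) with
    | true =>
      simp only [marker_ne_yield _ h, Bool.and_false, Bool.false_eq_true, if_false,
        if_true, pvALoop_true]
    | false =>
      simp only [Bool.false_and, Bool.false_eq_true, if_false, ih]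

-- peeling the FIRST line t off the reversed list: if t carries the marker, the
-- answer is whether any later line is "yield"; otherwise t is irrelevant
lemma pvBRev_append (xs : List String) (t : String) :
    pvBRev (xs ++ [t]) =
      if PySem.Str.isIn "self.auth_loading = True" t then xs.contains "yield"
      else pvBRev xs := by
  induction xs with
  | nil =>
    rw [List.nil_append, pvBRev]
    cases h : (t == "yield") with
    | true =>
      have ht : t = "yield" := eq_of_beq h
      subst ht
      simp [pvBRev]
    | false => simp [h, pvBRev]
  | cons x xs ih =>
    rw [List.cons_append, pvBRev]
    cases h : (x == "yield") with
    | true =>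
      have hx : x = "yield" := eq_of_beq h
      subst hx
      cases hm : PySem.Str.isIn "self.auth_loading = True" t with
      | true => simp_all
      | false => simp_all [pvBRev]
    | false =>
      simp only [Bool.false_eq_true, if_false, ih]
      cases hm : PySem.Str.isIn "self.auth_loading = True" t with
      | true =>
        simp only [if_true, List.contains_cons]
        have h2 : ("yield" == x) = false := by
          cases h2 : ("yield" == x) with
          | true => exact absurd (eq_of_beq h2).symm (by intro e; rw [e] at h; simp at h)
          | false => rfl
        simp [h2]
      | false => simp [pvBRev, h]

lemma pvMid_eq_pvBRev (ts : List String) :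
    pvMid ts = pvBRev ts.reverse := by
  induction ts with
  | nil => rfl
  | cons t ts ih =>
    rw [pvMid, List.reverse_cons, pvBRev_append]
    cases hm : PySem.Str.isIn "self.auth_loading = True" t with
    | true =>
      simp only [if_true]
      simp
    | false => simp only [Bool.false_eq_true, if_false, ih]

-- ===== VERDICT (by name: the statement is the Claim_ definition above) =====
theorem source_has_yield_after_loading_true_py_spec : Claim_equal_source_has_yield_after_loading_true_py := by
  intro src _
  unfold Spec_source_has_yield_after_loading_true_py source_has_yield_after_loading_true_py source_has_yield_after_loading_true_py_alt
  rw [pvALoop_eq_pvMid, pvMid_eq_pvBRev]
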